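-- pv_equiv track=rewrite | github.com/pkgunboat/ParaGUIBench | src/parallel_benchmark/eval/osworld_scripts/adapter.py | adapt_result_path
-- ===== SOURCE A (Python) =====
-- PATH_MAPPING = {
--     "/home/user/Desktop/": "/home/user/shared/",
--     "/home/user/Documents/": "/home/user/shared/",
--     "/home/user/Downloads/": "/home/user/shared/",
--     "/home/user/Pictures/": "/home/user/shared/",
--     "/home/user/Videos/": "/home/user/shared/",
--     "/home/user/Music/": "/home/user/shared/",
-- }
--
-- def adapt_result_path(osworld_path: str) -> str:
--     """
--     将 OSWorld 原生路径映射到共享目录路径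
--
--     输入:
--         osworld_path: OSWorld 原生文件路径，如 "/home/user/Desktop/students work/case study.docx"
--     输出:
--         映射后的路径，如 "/home/user/shared/students work/case study.docx"
--     """
--     if not osworld_path:
--         return osworld_path
--
--     for old_prefix, new_prefix in PATH_MAPPING.items():
--         if osworld_path.startswith(old_prefix):
--             return osworld_path.replace(old_prefix, new_prefix, 1)
--
--     # 如果没有匹配的前缀，但路径以 /home/user/ 开头，尝试默认映射到 shared
--     if osworld_path.startswith("/home/user/"):
--         # 提取相对路径部分
--         relative_path = osworld_path.replace("/home/user/", "", 1)
--         return f"/home/user/shared/{relative_path}"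
--
--     return osworld_path
-- ===== SOURCE B (Python) =====
-- FOLDERS = {"Desktop", "Documents", "Downloads", "Pictures", "Videos", "Music"}
--
--
-- def adapt_result_path(osworld_path: str) -> str:
--     if not osworld_path or not osworld_path.startswith("/home/user/"):
--         return osworld_path
--     rest = osworld_path[len("/home/user/"):]
--     i = rest.find("/")
--     if i != -1 and rest[:i] in FOLDERS:
--         rest = rest[i + 1:]
--     return "/home/user/shared/" + rest
-- ===== Notes on version B (the rewrite author's own statement) =====
-- stated objective: simpler
-- what changed: Replaces A's loop over six literal folder prefixes (each tried with startswith + replace) by a single computation on the part after the home prefix: find the first slash, test the first path component against a set of the six folder names, and drop that component if it matches.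
import Mathlib
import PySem

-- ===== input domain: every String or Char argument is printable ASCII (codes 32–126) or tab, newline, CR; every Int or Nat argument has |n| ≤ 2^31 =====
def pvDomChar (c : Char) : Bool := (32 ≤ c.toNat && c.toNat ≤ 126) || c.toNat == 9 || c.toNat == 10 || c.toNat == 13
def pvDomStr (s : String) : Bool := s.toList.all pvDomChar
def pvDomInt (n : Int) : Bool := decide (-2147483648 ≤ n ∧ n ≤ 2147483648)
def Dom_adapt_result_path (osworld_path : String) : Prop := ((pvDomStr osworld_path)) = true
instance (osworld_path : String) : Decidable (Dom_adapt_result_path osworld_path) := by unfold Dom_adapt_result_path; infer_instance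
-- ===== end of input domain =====

-- B replaces A's loop over six literal prefixes with one find('/') on the part after
-- "/home/user/" plus a set-membership test on the first path component (objective: simpler).

-- ===== PORT A =====
-- hand port of Python s.replace(old, new, 1): exact — replaces the first occurrence of old
-- (an empty old matches at position 0, as in Python); PySem.Chars.replace has no count form
def pyReplace1 (s old new : List Char) : List Char :=
  let i := PySem.Chars.find s old
  if i = -1 then s else s.take i.toNat ++ new ++ s.drop (i.toNat + old.length)

def pvPathMapping : List (List Char × List Char) :=
  [("/home/user/Desktop/".toList, "/home/user/shared/".toList),
   ("/home/user/Documents/".toList, "/home/user/shared/".toList),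
   ("/home/user/Downloads/".toList, "/home/user/shared/".toList),
   ("/home/user/Pictures/".toList, "/home/user/shared/".toList),
   ("/home/user/Videos/".toList, "/home/user/shared/".toList),
   ("/home/user/Music/".toList, "/home/user/shared/".toList)]

-- the 'for old_prefix, new_prefix in PATH_MAPPING.items()' loop with its early return
def adaptLoop (s : List Char) : List (List Char × List Char) → Option (List Char)
  | [] => none
  | (o, n) :: rest =>
      if PySem.Chars.startswith s o = true then some (pyReplace1 s o n) else adaptLoop s rest

def adapt_result_path (osworld_path : String) : String :=
  let s := osworld_path.toList
  if s = [] then osworld_path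
  else
    match adaptLoop s pvPathMapping with
    | some r => String.ofList r
    | none =>
      if PySem.Chars.startswith s "/home/user/".toList = true then
        String.ofList ("/home/user/shared/".toList ++ pyReplace1 s "/home/user/".toList [])
      else osworld_path

-- ===== PORT B =====
def pvFolders : PySem.Set (List Char) :=
  PySem.Set.ofList ["Desktop".toList, "Documents".toList, "Downloads".toList,
                    "Pictures".toList, "Videos".toList, "Music".toList]

def adapt_result_path_alt (osworld_path : String) : String :=
  let s := osworld_path.toList
  if s = [] ∨ PySem.Chars.startswith s "/home/user/".toList ≠ true then osworld_path
  else
    let rest := PySem.List.slice s (some 11) none   -- osworld_path[len("/home/user/"):], len = 11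
    let i := PySem.Chars.find rest ['/']
    let rest' :=
      if i ≠ -1 ∧ PySem.Set.contains pvFolders (PySem.List.slice rest none (some i)) = true then
        PySem.List.slice rest (some (i + 1)) none
      else rest
    String.ofList ("/home/user/shared/".toList ++ rest')

-- ===== PRECONDITION & SPEC =====
def Spec_adapt_result_path (osworld_path : String) (out : String) : Prop := out = adapt_result_path_alt osworld_path
instance (osworld_path : String) (out : String) : Decidable (Spec_adapt_result_path osworld_path out) := by unfold Spec_adapt_result_path; infer_instance

-- ===== CLAIM (what is proved, stated in full; the proofs are below) =====
def Claim_equal_adapt_result_path : Prop := ∀ (osworld_path : String), Dom_adapt_result_path osworld_path → Spec_adapt_result_path osworld_path (adapt_result_path osworld_path)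

-- ===== LEMMAS AND PROOFS =====

-- startswith is invariant under prepending the common "/home/user/" prefix
theorem startswith_hu_append (r x : List Char) :
    PySem.Chars.startswith ("/home/user/".toList ++ r) ("/home/user/".toList ++ x) =
      PySem.Chars.startswith r x := by
  by_cases h : x <+: r
  · rw [(PySem.Chars.startswith_iff _ _).2 h,
      (PySem.Chars.startswith_iff _ _).2 ((List.prefix_append_right_inj _).2 h)]
  · have h1 : PySem.Chars.startswith r x ≠ true := fun hc => h ((PySem.Chars.startswith_iff _ _).1 hc)
    have h2 : PySem.Chars.startswith ("/home/user/".toList ++ r) ("/home/user/".toList ++ x) ≠ true :=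
      fun hc => h ((List.prefix_append_right_inj _).1 ((PySem.Chars.startswith_iff _ _).1 hc))
    rw [Bool.eq_false_iff.2 h2, Bool.eq_false_iff.2 h1]

-- a longer prefix cannot match when "/home/user/" does not
theorem startswith_ext_false (s x : List Char)
    (h : PySem.Chars.startswith s "/home/user/".toList ≠ true) :
    PySem.Chars.startswith s ("/home/user/".toList ++ x) = false := by
  apply Bool.eq_false_iff.2
  intro hc
  exact h ((PySem.Chars.startswith_iff _ _).2
    ((List.prefix_append _ x).trans ((PySem.Chars.startswith_iff _ _).1 hc)))

-- if old is a prefix of s, its first occurrence is at 0: replace(old, new, 1) = new ++ rest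
theorem pyReplace1_of_prefix (s old new : List Char) (h : old <+: s) :
    pyReplace1 s old new = new ++ s.drop old.length := by
  have hnn : 0 ≤ PySem.Chars.find s old :=
    (PySem.Chars.find_nonneg_iff s old).2 h.isInfix
  have hspec := PySem.Chars.find_spec hnn
  have hzero : (PySem.Chars.find s old).toNat = 0 := by
    by_contra hne
    exact hspec.2 0 (Nat.pos_of_ne_zero hne) (by simpa using h)
  have : PySem.Chars.find s old = 0 := by omega
  simp [pyReplace1, this]

-- the first '/' of f ++ '/' :: t sits right after f when f contains no slash
theorem find_slash (f t : List Char) (hf : '/' ∉ f) :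
    PySem.Chars.find (f ++ '/' :: t) ['/'] = (f.length : Int) := by
  have hinf : ['/'] <:+: (f ++ '/' :: t) := ⟨f, t, by simp⟩
  have hnn : 0 ≤ PySem.Chars.find (f ++ '/' :: t) ['/'] :=
    (PySem.Chars.find_nonneg_iff _ _).2 hinf
  have hspec := PySem.Chars.find_spec hnn
  set i := (PySem.Chars.find (f ++ '/' :: t) ['/']).toNat with hi
  have hle : i ≤ f.length := by
    by_contra hgt
    exact hspec.2 f.length (by omega) (by simp)
  have hge : ¬ i < f.length := by
    intro hlt
    obtain ⟨u, hu⟩ := hspec.1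
    rw [List.drop_append_of_le_length (by omega), List.drop_eq_getElem_cons hlt,
      List.cons_append] at hu
    have hhead : '/' = f[i] := ((List.cons.injEq _ _ _ _).mp hu).1
    exact hf (hhead ▸ List.getElem_mem hlt)
  omega

-- decomposing r at its first '/'
theorem find_decomp (r : List Char) (hnn : 0 ≤ PySem.Chars.find r ['/']) :
    r = r.take (PySem.Chars.find r ['/']).toNat ++
        '/' :: r.drop ((PySem.Chars.find r ['/']).toNat + 1) := by
  have hspec := PySem.Chars.find_spec hnn
  set i := (PySem.Chars.find r ['/']).toNat with hi
  obtain ⟨u, hu⟩ := hspec.1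
  simp at hu
  have hd1 : r.drop (i + 1) = u := by
    have := congrArg (List.drop 1) hu
    simpa [List.drop_drop] using this.symm
  conv_lhs => rw [← List.take_append_drop i r]
  rw [← hu, hd1]

-- two distinct slash-free folder names cannot both open the same path
theorem folder_prefix_unique (f g t : List Char) (hf : '/' ∉ f) (hg : '/' ∉ g) (hne : g ≠ f) :
    PySem.Chars.startswith (f ++ '/' :: t) (g ++ ['/']) = false := by
  apply Bool.eq_false_iff.2
  intro hc
  obtain ⟨u, hu⟩ := (PySem.Chars.startswith_iff _ _).1 hc
  have hu' : f ++ '/' :: t = g ++ '/' :: u := by simpa using hu.symm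
  have h1 := find_slash f t hf
  have h2 := find_slash g u hg
  rw [hu'] at h1
  have hlen : f.length = g.length := by omega
  exact hne (List.append_inj_left hu'.symm hlen.symm)

-- evaluating port B on a path that starts with "/home/user/"
theorem alt_eval (p : String) (r : List Char) (hr : "/home/user/".toList ++ r = p.toList) :
    adapt_result_path_alt p =
      String.ofList ("/home/user/shared/".toList ++
        (if PySem.Chars.find r ['/'] ≠ -1 ∧
            PySem.Set.contains pvFolders
              (PySem.List.slice r none (some (PySem.Chars.find r ['/']))) = true
         then PySem.List.slice r (some (PySem.Chars.find r ['/'] + 1)) none else r)) := by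
  have hnil : ¬(p.toList = []) := by rw [← hr]; simp
  have hhu : PySem.Chars.startswith p.toList "/home/user/".toList = true :=
    (PySem.Chars.startswith_iff _ _).2 ⟨r, hr⟩
  have hrest : PySem.List.slice p.toList (some 11) none = r := by
    rw [← hr, show (11 : Int) = ((11 : Nat) : Int) from rfl, PySem.List.slice_from_natCast,
      show (11 : Nat) = "/home/user/".toList.length from rfl, List.drop_left]
  simp only [adapt_result_path_alt, hrest, hhu, hnil]
  simp

-- evaluating port B when the first component after "/home/user/" is a known folder
theorem B_matched (p : String) (f t : List Char) (hf : '/' ∉ f)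
    (hmem : PySem.Set.contains pvFolders f = true)
    (hr : "/home/user/".toList ++ (f ++ '/' :: t) = p.toList) :
    adapt_result_path_alt p = String.ofList ("/home/user/shared/".toList ++ t) := by
  rw [alt_eval p (f ++ '/' :: t) hr, find_slash f t hf]
  have htake : PySem.List.slice (f ++ '/' :: t) none (some (f.length : Int)) = f := by
    rw [PySem.List.slice_to_natCast]; exact List.take_left
  have hdrop : PySem.List.slice (f ++ '/' :: t) (some ((f.length : Int) + 1)) none = t := by
    rw [show ((f.length : Int) + 1) = ((f.length + 1 : Nat) : Int) by push_cast; ring,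
      PySem.List.slice_from_natCast]
    simp [List.drop_length_add_append (i := 1) (l₁ := f) (l₂ := '/' :: t)]
  rw [htake, hdrop]
  have hmem' : f ∈ pvFolders := by simpa [PySem.Set.contains] using hmem
  simp [hmem', show ((f.length : Int)) ≠ -1 by omega]

-- evaluating port A's replace on a matching prefix
theorem A_matched (p : String) (old t : List Char) (h : p.toList = old ++ t) :
    pyReplace1 p.toList old "/home/user/shared/".toList = "/home/user/shared/".toList ++ t := by
  rw [pyReplace1_of_prefix _ _ _ ⟨t, h.symm⟩, h, List.drop_left]

-- evaluating port B when no known folder opens the remainder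
theorem B_unmatched (p : String) (r : List Char) (hr : "/home/user/".toList ++ r = p.toList)
    (h1 : PySem.Chars.startswith r ("Desktop".toList ++ ['/']) ≠ true)
    (h2 : PySem.Chars.startswith r ("Documents".toList ++ ['/']) ≠ true)
    (h3 : PySem.Chars.startswith r ("Downloads".toList ++ ['/']) ≠ true)
    (h4 : PySem.Chars.startswith r ("Pictures".toList ++ ['/']) ≠ true)
    (h5 : PySem.Chars.startswith r ("Videos".toList ++ ['/']) ≠ true)
    (h6 : PySem.Chars.startswith r ("Music".toList ++ ['/']) ≠ true) :
    adapt_result_path_alt p = String.ofList ("/home/user/shared/".toList ++ r) := by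
  rw [alt_eval p r hr]
  have hcond : ¬(PySem.Chars.find r ['/'] ≠ -1 ∧
      PySem.Set.contains pvFolders
        (PySem.List.slice r none (some (PySem.Chars.find r ['/']))) = true) := by
    rintro ⟨hne, hmem⟩
    have hnn : 0 ≤ PySem.Chars.find r ['/'] := by
      have := PySem.Chars.neg_one_le_find r ['/']
      omega
    have hdec := find_decomp r hnn
    rw [show PySem.Chars.find r ['/'] = (((PySem.Chars.find r ['/']).toNat : Nat) : Int) from
      (Int.toNat_of_nonneg hnn).symm, PySem.List.slice_to_natCast] at hmem
    have hmem' : r.take (PySem.Chars.find r ['/']).toNat ∈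
        ["Desktop".toList, "Documents".toList, "Downloads".toList,
         "Pictures".toList, "Videos".toList, "Music".toList] := by
      simpa [pvFolders, PySem.Set.contains] using hmem
    have hpref : ∀ f : List Char, r.take (PySem.Chars.find r ['/']).toNat = f →
        PySem.Chars.startswith r (f ++ ['/']) = true := by
      intro f hfeq
      refine (PySem.Chars.startswith_iff _ _).2
        ⟨r.drop ((PySem.Chars.find r ['/']).toNat + 1), ?_⟩
      conv_rhs => rw [hdec]
      rw [← hfeq]; simp
    simp only [List.mem_cons, List.not_mem_nil, or_false] at hmem'
    rcases hmem' with h | h | h | h | h | h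
    · exact h1 (hpref _ h)
    · exact h2 (hpref _ h)
    · exact h3 (hpref _ h)
    · exact h4 (hpref _ h)
    · exact h5 (hpref _ h)
    · exact h6 (hpref _ h)
  rw [if_neg hcond]

-- literal prefix decompositions used to line the two ports up
theorem eD1 : "/home/user/Desktop/".toList = "/home/user/".toList ++ ("Desktop".toList ++ ['/']) := by decide
theorem eD2 : "/home/user/Documents/".toList = "/home/user/".toList ++ ("Documents".toList ++ ['/']) := by decide
theorem eD3 : "/home/user/Downloads/".toList = "/home/user/".toList ++ ("Downloads".toList ++ ['/']) := by decide
theorem eD4 : "/home/user/Pictures/".toList = "/home/user/".toList ++ ("Pictures".toList ++ ['/']) := by decide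
theorem eD5 : "/home/user/Videos/".toList = "/home/user/".toList ++ ("Videos".toList ++ ['/']) := by decide
theorem eD6 : "/home/user/Music/".toList = "/home/user/".toList ++ ("Music".toList ++ ['/']) := by decide

-- ===== VERDICT (by name: the statement is the Claim_ definition above) =====
theorem adapt_result_path_spec : Claim_equal_adapt_result_path := by
  intro p _
  show adapt_result_path p = adapt_result_path_alt p
  by_cases hnil : p.toList = []
  · simp [adapt_result_path, adapt_result_path_alt, hnil]
  by_cases hhu : PySem.Chars.startswith p.toList "/home/user/".toList = true
  case neg =>
    have d1 : PySem.Chars.startswith p.toList "/home/user/Desktop/".toList = false := by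
      rw [eD1]; exact startswith_ext_false _ _ hhu
    have d2 : PySem.Chars.startswith p.toList "/home/user/Documents/".toList = false := by
      rw [eD2]; exact startswith_ext_false _ _ hhu
    have d3 : PySem.Chars.startswith p.toList "/home/user/Downloads/".toList = false := by
      rw [eD3]; exact startswith_ext_false _ _ hhu
    have d4 : PySem.Chars.startswith p.toList "/home/user/Pictures/".toList = false := by
      rw [eD4]; exact startswith_ext_false _ _ hhu
    have d5 : PySem.Chars.startswith p.toList "/home/user/Videos/".toList = false := by
      rw [eD5]; exact startswith_ext_false _ _ hhu
    have d6 : PySem.Chars.startswith p.toList "/home/user/Music/".toList = false := by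
      rw [eD6]; exact startswith_ext_false _ _ hhu
    simp only [adapt_result_path, adapt_result_path_alt, adaptLoop, pvPathMapping,
      d1, d2, d3, d4, d5, d6, Bool.false_eq_true, if_false, if_neg hnil]
    rw [if_neg hhu, if_pos (Or.inr hhu)]
  case pos =>
    obtain ⟨r, hr⟩ := (PySem.Chars.startswith_iff _ _).1 hhu
    -- the six folder tests on the remainder r, in A's loop order
    by_cases k1 : PySem.Chars.startswith r ("Desktop".toList ++ ['/']) = true
    case pos =>
      obtain ⟨t, ht⟩ := (PySem.Chars.startswith_iff _ _).1 k1
      have hr2 : "/home/user/".toList ++ ("Desktop".toList ++ '/' :: t) = p.toList := by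
        rw [← hr, ← ht]; simp
      have hrEq : r = "Desktop".toList ++ '/' :: t := by rw [← ht]; simp
      have hrB := B_matched p "Desktop".toList t (by decide) (by decide) hr2
      have dA : PySem.Chars.startswith p.toList "/home/user/Desktop/".toList = true := by
        rw [eD1, ← hr, startswith_hu_append]; exact k1
      have d2 : PySem.Chars.startswith p.toList "/home/user/Documents/".toList = false := by
        rw [eD2, ← hr, startswith_hu_append, hrEq]
        exact folder_prefix_unique _ _ _ (by decide) (by decide) (by decide)
      have d3 : PySem.Chars.startswith p.toList "/home/user/Downloads/".toList = false := by
        rw [eD3, ← hr, startswith_hu_append, hrEq]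
        exact folder_prefix_unique _ _ _ (by decide) (by decide) (by decide)
      have d4 : PySem.Chars.startswith p.toList "/home/user/Pictures/".toList = false := by
        rw [eD4, ← hr, startswith_hu_append, hrEq]
        exact folder_prefix_unique _ _ _ (by decide) (by decide) (by decide)
      have d5 : PySem.Chars.startswith p.toList "/home/user/Videos/".toList = false := by
        rw [eD5, ← hr, startswith_hu_append, hrEq]
        exact folder_prefix_unique _ _ _ (by decide) (by decide) (by decide)
      have d6 : PySem.Chars.startswith p.toList "/home/user/Music/".toList = false := by
        rw [eD6, ← hr, startswith_hu_append, hrEq]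
        exact folder_prefix_unique _ _ _ (by decide) (by decide) (by decide)
      rw [hrB]
      simp only [adapt_result_path, adaptLoop, pvPathMapping, if_neg hnil,
        dA, d2, d3, d4, d5, d6, Bool.false_eq_true, if_false, if_true]
      rw [A_matched p _ t (by rw [eD1, ← hr2]; simp)]
    by_cases k2 : PySem.Chars.startswith r ("Documents".toList ++ ['/']) = true
    case pos =>
      obtain ⟨t, ht⟩ := (PySem.Chars.startswith_iff _ _).1 k2
      have hr2 : "/home/user/".toList ++ ("Documents".toList ++ '/' :: t) = p.toList := by
        rw [← hr, ← ht]; simp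
      have hrEq : r = "Documents".toList ++ '/' :: t := by rw [← ht]; simp
      have hrB := B_matched p "Documents".toList t (by decide) (by decide) hr2
      have dA : PySem.Chars.startswith p.toList "/home/user/Documents/".toList = true := by
        rw [eD2, ← hr, startswith_hu_append]; exact k2
      have d1 : PySem.Chars.startswith p.toList "/home/user/Desktop/".toList = false := by
        rw [eD1, ← hr, startswith_hu_append, hrEq]
        exact folder_prefix_unique _ _ _ (by decide) (by decide) (by decide)
      have d3 : PySem.Chars.startswith p.toList "/home/user/Downloads/".toList = false := by
        rw [eD3, ← hr, startswith_hu_append, hrEq]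
        exact folder_prefix_unique _ _ _ (by decide) (by decide) (by decide)
      have d4 : PySem.Chars.startswith p.toList "/home/user/Pictures/".toList = false := by
        rw [eD4, ← hr, startswith_hu_append, hrEq]
        exact folder_prefix_unique _ _ _ (by decide) (by decide) (by decide)
      have d5 : PySem.Chars.startswith p.toList "/home/user/Videos/".toList = false := by
        rw [eD5, ← hr, startswith_hu_append, hrEq]
        exact folder_prefix_unique _ _ _ (by decide) (by decide) (by decide)
      have d6 : PySem.Chars.startswith p.toList "/home/user/Music/".toList = false := by
        rw [eD6, ← hr, startswith_hu_append, hrEq]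
        exact folder_prefix_unique _ _ _ (by decide) (by decide) (by decide)
      rw [hrB]
      simp only [adapt_result_path, adaptLoop, pvPathMapping, if_neg hnil,
        dA, d1, d3, d4, d5, d6, Bool.false_eq_true, if_false, if_true]
      rw [A_matched p _ t (by rw [eD2, ← hr2]; simp)]
    by_cases k3 : PySem.Chars.startswith r ("Downloads".toList ++ ['/']) = true
    case pos =>
      obtain ⟨t, ht⟩ := (PySem.Chars.startswith_iff _ _).1 k3
      have hr2 : "/home/user/".toList ++ ("Downloads".toList ++ '/' :: t) = p.toList := by
        rw [← hr, ← ht]; simp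
      have hrEq : r = "Downloads".toList ++ '/' :: t := by rw [← ht]; simp
      have hrB := B_matched p "Downloads".toList t (by decide) (by decide) hr2
      have dA : PySem.Chars.startswith p.toList "/home/user/Downloads/".toList = true := by
        rw [eD3, ← hr, startswith_hu_append]; exact k3
      have d1 : PySem.Chars.startswith p.toList "/home/user/Desktop/".toList = false := by
        rw [eD1, ← hr, startswith_hu_append, hrEq]
        exact folder_prefix_unique _ _ _ (by decide) (by decide) (by decide)
      have d2 : PySem.Chars.startswith p.toList "/home/user/Documents/".toList = false := by
        rw [eD2, ← hr, startswith_hu_append, hrEq]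
        exact folder_prefix_unique _ _ _ (by decide) (by decide) (by decide)
      have d4 : PySem.Chars.startswith p.toList "/home/user/Pictures/".toList = false := by
        rw [eD4, ← hr, startswith_hu_append, hrEq]
        exact folder_prefix_unique _ _ _ (by decide) (by decide) (by decide)
      have d5 : PySem.Chars.startswith p.toList "/home/user/Videos/".toList = false := by
        rw [eD5, ← hr, startswith_hu_append, hrEq]
        exact folder_prefix_unique _ _ _ (by decide) (by decide) (by decide)
      have d6 : PySem.Chars.startswith p.toList "/home/user/Music/".toList = false := by
        rw [eD6, ← hr, startswith_hu_append, hrEq]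
        exact folder_prefix_unique _ _ _ (by decide) (by decide) (by decide)
      rw [hrB]
      simp only [adapt_result_path, adaptLoop, pvPathMapping, if_neg hnil,
        dA, d1, d2, d4, d5, d6, Bool.false_eq_true, if_false, if_true]
      rw [A_matched p _ t (by rw [eD3, ← hr2]; simp)]
    by_cases k4 : PySem.Chars.startswith r ("Pictures".toList ++ ['/']) = true
    case pos =>
      obtain ⟨t, ht⟩ := (PySem.Chars.startswith_iff _ _).1 k4
      have hr2 : "/home/user/".toList ++ ("Pictures".toList ++ '/' :: t) = p.toList := by
        rw [← hr, ← ht]; simp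
      have hrEq : r = "Pictures".toList ++ '/' :: t := by rw [← ht]; simp
      have hrB := B_matched p "Pictures".toList t (by decide) (by decide) hr2
      have dA : PySem.Chars.startswith p.toList "/home/user/Pictures/".toList = true := by
        rw [eD4, ← hr, startswith_hu_append]; exact k4
      have d1 : PySem.Chars.startswith p.toList "/home/user/Desktop/".toList = false := by
        rw [eD1, ← hr, startswith_hu_append, hrEq]
        exact folder_prefix_unique _ _ _ (by decide) (by decide) (by decide)
      have d2 : PySem.Chars.startswith p.toList "/home/user/Documents/".toList = false := by
        rw [eD2, ← hr, startswith_hu_append, hrEq]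
        exact folder_prefix_unique _ _ _ (by decide) (by decide) (by decide)
      have d3 : PySem.Chars.startswith p.toList "/home/user/Downloads/".toList = false := by
        rw [eD3, ← hr, startswith_hu_append, hrEq]
        exact folder_prefix_unique _ _ _ (by decide) (by decide) (by decide)
      have d5 : PySem.Chars.startswith p.toList "/home/user/Videos/".toList = false := by
        rw [eD5, ← hr, startswith_hu_append, hrEq]
        exact folder_prefix_unique _ _ _ (by decide) (by decide) (by decide)
      have d6 : PySem.Chars.startswith p.toList "/home/user/Music/".toList = false := by
        rw [eD6, ← hr, startswith_hu_append, hrEq]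
        exact folder_prefix_unique _ _ _ (by decide) (by decide) (by decide)
      rw [hrB]
      simp only [adapt_result_path, adaptLoop, pvPathMapping, if_neg hnil,
        dA, d1, d2, d3, d5, d6, Bool.false_eq_true, if_false, if_true]
      rw [A_matched p _ t (by rw [eD4, ← hr2]; simp)]
    by_cases k5 : PySem.Chars.startswith r ("Videos".toList ++ ['/']) = true
    case pos =>
      obtain ⟨t, ht⟩ := (PySem.Chars.startswith_iff _ _).1 k5
      have hr2 : "/home/user/".toList ++ ("Videos".toList ++ '/' :: t) = p.toList := by
        rw [← hr, ← ht]; simp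
      have hrEq : r = "Videos".toList ++ '/' :: t := by rw [← ht]; simp
      have hrB := B_matched p "Videos".toList t (by decide) (by decide) hr2
      have dA : PySem.Chars.startswith p.toList "/home/user/Videos/".toList = true := by
        rw [eD5, ← hr, startswith_hu_append]; exact k5
      have d1 : PySem.Chars.startswith p.toList "/home/user/Desktop/".toList = false := by
        rw [eD1, ← hr, startswith_hu_append, hrEq]
        exact folder_prefix_unique _ _ _ (by decide) (by decide) (by decide)
      have d2 : PySem.Chars.startswith p.toList "/home/user/Documents/".toList = false := by
        rw [eD2, ← hr, startswith_hu_append, hrEq]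
        exact folder_prefix_unique _ _ _ (by decide) (by decide) (by decide)
      have d3 : PySem.Chars.startswith p.toList "/home/user/Downloads/".toList = false := by
        rw [eD3, ← hr, startswith_hu_append, hrEq]
        exact folder_prefix_unique _ _ _ (by decide) (by decide) (by decide)
      have d4 : PySem.Chars.startswith p.toList "/home/user/Pictures/".toList = false := by
        rw [eD4, ← hr, startswith_hu_append, hrEq]
        exact folder_prefix_unique _ _ _ (by decide) (by decide) (by decide)
      have d6 : PySem.Chars.startswith p.toList "/home/user/Music/".toList = false := by
        rw [eD6, ← hr, startswith_hu_append, hrEq]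
        exact folder_prefix_unique _ _ _ (by decide) (by decide) (by decide)
      rw [hrB]
      simp only [adapt_result_path, adaptLoop, pvPathMapping, if_neg hnil,
        dA, d1, d2, d3, d4, d6, Bool.false_eq_true, if_false, if_true]
      rw [A_matched p _ t (by rw [eD5, ← hr2]; simp)]
    by_cases k6 : PySem.Chars.startswith r ("Music".toList ++ ['/']) = true
    case pos =>
      obtain ⟨t, ht⟩ := (PySem.Chars.startswith_iff _ _).1 k6
      have hr2 : "/home/user/".toList ++ ("Music".toList ++ '/' :: t) = p.toList := by
        rw [← hr, ← ht]; simp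
      have hrEq : r = "Music".toList ++ '/' :: t := by rw [← ht]; simp
      have hrB := B_matched p "Music".toList t (by decide) (by decide) hr2
      have dA : PySem.Chars.startswith p.toList "/home/user/Music/".toList = true := by
        rw [eD6, ← hr, startswith_hu_append]; exact k6
      have d1 : PySem.Chars.startswith p.toList "/home/user/Desktop/".toList = false := by
        rw [eD1, ← hr, startswith_hu_append, hrEq]
        exact folder_prefix_unique _ _ _ (by decide) (by decide) (by decide)
      have d2 : PySem.Chars.startswith p.toList "/home/user/Documents/".toList = false := by
        rw [eD2, ← hr, startswith_hu_append, hrEq]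
        exact folder_prefix_unique _ _ _ (by decide) (by decide) (by decide)
      have d3 : PySem.Chars.startswith p.toList "/home/user/Downloads/".toList = false := by
        rw [eD3, ← hr, startswith_hu_append, hrEq]
        exact folder_prefix_unique _ _ _ (by decide) (by decide) (by decide)
      have d4 : PySem.Chars.startswith p.toList "/home/user/Pictures/".toList = false := by
        rw [eD4, ← hr, startswith_hu_append, hrEq]
        exact folder_prefix_unique _ _ _ (by decide) (by decide) (by decide)
      have d5 : PySem.Chars.startswith p.toList "/home/user/Videos/".toList = false := by
        rw [eD5, ← hr, startswith_hu_append, hrEq]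
        exact folder_prefix_unique _ _ _ (by decide) (by decide) (by decide)
      rw [hrB]
      simp only [adapt_result_path, adaptLoop, pvPathMapping, if_neg hnil,
        dA, d1, d2, d3, d4, d5, Bool.false_eq_true, if_false, if_true]
      rw [A_matched p _ t (by rw [eD6, ← hr2]; simp)]
    -- no folder matches: the generic /home/user/ mapping on both sides
    have d1 : PySem.Chars.startswith p.toList "/home/user/Desktop/".toList = false := by
      rw [eD1, ← hr, startswith_hu_append]; exact Bool.eq_false_iff.2 k1
    have d2 : PySem.Chars.startswith p.toList "/home/user/Documents/".toList = false := by
      rw [eD2, ← hr, startswith_hu_append]; exact Bool.eq_false_iff.2 k2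
    have d3 : PySem.Chars.startswith p.toList "/home/user/Downloads/".toList = false := by
      rw [eD3, ← hr, startswith_hu_append]; exact Bool.eq_false_iff.2 k3
    have d4 : PySem.Chars.startswith p.toList "/home/user/Pictures/".toList = false := by
      rw [eD4, ← hr, startswith_hu_append]; exact Bool.eq_false_iff.2 k4
    have d5 : PySem.Chars.startswith p.toList "/home/user/Videos/".toList = false := by
      rw [eD5, ← hr, startswith_hu_append]; exact Bool.eq_false_iff.2 k5
    have d6 : PySem.Chars.startswith p.toList "/home/user/Music/".toList = false := by
      rw [eD6, ← hr, startswith_hu_append]; exact Bool.eq_false_iff.2 k6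
    rw [B_unmatched p r hr k1 k2 k3 k4 k5 k6]
    simp only [adapt_result_path, adaptLoop, pvPathMapping, if_neg hnil,
      d1, d2, d3, d4, d5, d6, Bool.false_eq_true, if_false]
    rw [if_pos hhu, pyReplace1_of_prefix _ _ _ ⟨r, hr⟩, ← hr]
    simp
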